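-- pv_equiv track=rewrite | github.com/iks15174/study | programmers/블록게임.py | dfs
-- ===== SOURCE A (Python) =====
-- def dfs(r, c, visited, board, n):
--     move = [[1, 0], [0, 1], [-1, 0], [0, -1]]
--     shape_id = board[r][c]
--     visited[r][c] = True
--     q = [[r, c]]
--     lr = r
--     rr = r
--     lc = c
--     rc = c
--     while q:
--         cr, cc = q.pop()
--         for m in move:
--             nr = cr + m[0]
--             nc = cc + m[1]
--             if (
--                 nr < 0
--                 or nr >= n
--                 or nc < 0
--                 or nc >= n
--                 or board[nr][nc] != shape_id
--                 or visited[nr][nc]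
--             ):
--                 continue
--             q.append((nr, nc))
--             visited[nr][nc] = True
--             lr = min(lr, nr)
--             rr = max(rr, nr)
--             lc = min(lc, nc)
--             rc = max(rc, nc)
--     return (lr, lc, rr, rc)
-- ===== SOURCE B (Python) =====
-- def dfs(r, c, visited, board, n):
--     shape_id = board[r][c]
--     visited[r][c] = True
--     q = [(r, c)]
--     head = 0
--     while head < len(q):
--         cr, cc = q[head]
--         head += 1
--         for dr, dc in ((1, 0), (0, 1), (-1, 0), (0, -1)):
--             nr = cr + dr
--             nc = cc + dc
--             if 0 <= nr < n and 0 <= nc < n and board[nr][nc] == shape_id and not visited[nr][nc]: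
--                 visited[nr][nc] = True
--                 q.append((nr, nc))
--     return (min(x for x, _ in q), min(y for _, y in q),
--             max(x for x, _ in q), max(y for _, y in q))
-- ===== Notes on version B (the rewrite author's own statement) =====
-- stated objective: alternative
-- what changed: B replaces A's LIFO stack flood fill with inline min/max bookkeeping by a FIFO breadth-first fill over an append-only list read through an index pointer (the list doubles as the record of visited cells, nothing is ever popped), and computes the bounding box in a separate aggregation pass afterwards; the traversal order is genuinely different and the proof shows the visited set is order-independent.
import Mathlib
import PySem

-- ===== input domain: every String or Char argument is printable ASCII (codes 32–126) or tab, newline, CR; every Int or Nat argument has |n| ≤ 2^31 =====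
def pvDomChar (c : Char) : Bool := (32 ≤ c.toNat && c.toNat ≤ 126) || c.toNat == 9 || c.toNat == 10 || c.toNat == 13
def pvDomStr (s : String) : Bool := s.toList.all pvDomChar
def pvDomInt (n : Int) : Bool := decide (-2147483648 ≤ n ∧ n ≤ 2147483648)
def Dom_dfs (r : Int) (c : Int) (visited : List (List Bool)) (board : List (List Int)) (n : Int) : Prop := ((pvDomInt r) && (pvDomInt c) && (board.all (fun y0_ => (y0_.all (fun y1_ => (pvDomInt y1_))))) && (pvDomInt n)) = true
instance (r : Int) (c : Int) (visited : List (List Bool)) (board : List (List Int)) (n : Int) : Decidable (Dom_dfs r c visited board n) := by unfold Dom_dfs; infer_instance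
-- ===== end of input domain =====

-- B replaces A's LIFO stack flood fill with inline min/max bookkeeping by a FIFO breadth-first
-- fill over an append-only list read through an index pointer, and computes the bounding box in a
-- separate aggregation pass; the proof shows the set of visited cells is traversal-order
-- independent.  Both Pythons mutate `visited` in place (they mark the same cells); the theorems
-- below are about the return value.

-- Shared helpers: Python's board[i][j] / visited[i][j] reads and visited[i][j] = True
-- (PySem pyGetD/pySetD give Python's negative-index wraparound; the defaults are only
-- reachable outside Pre_dfs, where Python raises IndexError).
def pvCell (board : List (List Int)) (i j : Int) : Int :=
  PySem.List.pyGetD (PySem.List.pyGetD board i []) j 0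

def pvVis (visited : List (List Bool)) (i j : Int) : Bool :=
  PySem.List.pyGetD (PySem.List.pyGetD visited i []) j true

def pvMark (visited : List (List Bool)) (i j : Int) : List (List Bool) :=
  PySem.List.pySetD visited i (PySem.List.pySetD (PySem.List.pyGetD visited i []) j true)

def pvMoves : List (Int × Int) := [(1, 0), (0, 1), (-1, 0), (0, -1)]

-- Fuel for both while-loops (a pure totality guard): every push flips a distinct
-- False cell of `visited` to True, so iterations ≤ 1 + (total cells) < pvFuel visited.
def pvFuel (visited : List (List Bool)) : Nat :=
  visited.foldl (fun a row => a + row.length) 2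

-- ===== PORT A =====
-- one `for m in move` body of A: state (visited, q, lr, rr, lc, rc)
def pvStepA (board : List (List Int)) (shape n cr cc : Int)
    (s : List (List Bool) × List (Int × Int) × Int × Int × Int × Int) (m : Int × Int) :
    List (List Bool) × List (Int × Int) × Int × Int × Int × Int :=
  let nr := cr + m.1
  let nc := cc + m.2
  if nr < 0 ∨ nr ≥ n ∨ nc < 0 ∨ nc ≥ n ∨ pvCell board nr nc ≠ shape ∨ pvVis s.1 nr nc then
    s
  else
    (pvMark s.1 nr nc, (nr, nc) :: s.2.1,
     min s.2.2.1 nr, max s.2.2.2.1 nr, min s.2.2.2.2.1 nc, max s.2.2.2.2.2 nc)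

-- A's while loop; the stack top is the list head (Python appends/pops at the same end).
def pvLoopA (board : List (List Int)) (shape n : Int) :
    Nat → List (List Bool) × List (Int × Int) × Int × Int × Int × Int → Int × Int × Int × Int
  | 0, s => (s.2.2.1, s.2.2.2.2.1, s.2.2.2.1, s.2.2.2.2.2)
  | fuel + 1, s =>
    match s.2.1 with
    | [] => (s.2.2.1, s.2.2.2.2.1, s.2.2.2.1, s.2.2.2.2.2)
    | (cr, cc) :: q =>
      pvLoopA board shape n fuel (pvMoves.foldl (pvStepA board shape n cr cc) (s.1, q, s.2.2))

def dfs (r : Int) (c : Int) (visited : List (List Bool)) (board : List (List Int)) (n : Int) : Int × Int × Int × Int :=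
  let shape := pvCell board r c
  pvLoopA board shape n (pvFuel visited) (pvMark visited r c, [(r, c)], r, r, c, c)

-- ===== PORT B =====
-- one inner-loop body of B: state (visited, q, head); q is append-only
def pvStepB (board : List (List Int)) (shape n cr cc : Int)
    (s : List (List Bool) × List (Int × Int) × Int) (m : Int × Int) :
    List (List Bool) × List (Int × Int) × Int :=
  let nr := cr + m.1
  let nc := cc + m.2
  if 0 ≤ nr ∧ nr < n ∧ 0 ≤ nc ∧ nc < n ∧ pvCell board nr nc = shape ∧ pvVis s.1 nr nc = false then
    (pvMark s.1 nr nc, s.2.1 ++ [(nr, nc)], s.2.2)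
  else
    s

-- B's while loop: read q through the index pointer head, never pop; returns the full q.
def pvLoopB (board : List (List Int)) (shape n : Int) :
    Nat → List (List Bool) × List (Int × Int) × Int → List (Int × Int)
  | 0, s => s.2.1
  | fuel + 1, s =>
    if s.2.2 < PySem.List.len s.2.1 then
      let p := PySem.List.pyGetD s.2.1 s.2.2 (0, 0)
      pvLoopB board shape n fuel (pvMoves.foldl (pvStepB board shape n p.1 p.2) (s.1, s.2.1, s.2.2 + 1))
    else s.2.1

-- Python's min()/max() of a nonempty int sequence (the [] default is unreachable: q starts nonempty).
def pvMinI (l : List Int) : Int := (PySem.List.min? l (fun y => y)).getD 0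
def pvMaxI (l : List Int) : Int := (PySem.List.max? l (fun y => y)).getD 0

def dfs_alt (r : Int) (c : Int) (visited : List (List Bool)) (board : List (List Int)) (n : Int) : Int × Int × Int × Int :=
  let shape := pvCell board r c
  let q := pvLoopB board shape n (pvFuel visited) (pvMark visited r c, [(r, c)], 0)
  (pvMinI (q.map Prod.fst), pvMinI (q.map Prod.snd), pvMaxI (q.map Prod.fst), pvMaxI (q.map Prod.snd))

-- ===== PRECONDITION & SPEC =====
-- Helper for Pre_: the in-grid neighbour (ni, nj) cannot extend the fill (wrong shape, or
-- already visited and within bounds), so the loops stop after the first pop.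
def pvNbrOk (board : List (List Int)) (visited : List (List Bool)) (n shape ni nj : Int) : Bool :=
  !(decide (0 ≤ ni) && decide (ni < n) && decide (0 ≤ nj) && decide (nj < n)) ||
    (decide (ni < (board.length : Int)) &&
     decide (nj < ((PySem.List.pyGetD board ni []).length : Int)) &&
     (pvCell board ni nj != shape ||
       (decide (ni < (visited.length : Int)) &&
        decide (nj < ((PySem.List.pyGetD visited ni []).length : Int)) &&
        pvVis visited ni nj)))

-- Pre_ admits the closed-form shapes on which Python A completes: the start cell is in index
-- range of both grids, and either n ≤ 0 (no neighbour is ever taken), or board and visited cover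
-- the whole n×n grid, or no in-grid neighbour of the start can extend the fill.  On other ragged
-- inputs A's IndexError depends on which cells the fill reaches (not closed-form); a few of those
-- still return normally and are excluded as shape-inconsistent corners (see cites).
def Pre_dfs (r : Int) (c : Int) (visited : List (List Bool)) (board : List (List Int)) (n : Int) : Prop :=
  PySem.Raise.InRange board.length r ∧
  PySem.Raise.InRange (PySem.List.pyGetD board r []).length c ∧
  PySem.Raise.InRange visited.length r ∧
  PySem.Raise.InRange (PySem.List.pyGetD visited r []).length c ∧
  (n ≤ 0 ∨
   (1 ≤ n ∧ -n ≤ r ∧ r < n ∧ -n ≤ c ∧ c < n ∧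
    n ≤ (board.length : Int) ∧ n ≤ (visited.length : Int) ∧
    (∀ row ∈ board, n ≤ (row.length : Int)) ∧ (∀ row ∈ visited, n ≤ (row.length : Int))) ∨
   (pvMoves.all (fun m => pvNbrOk board visited n (pvCell board r c) (r + m.1) (c + m.2)) = true))
instance (r : Int) (c : Int) (visited : List (List Bool)) (board : List (List Int)) (n : Int) : Decidable (Pre_dfs r c visited board n) := by unfold Pre_dfs; infer_instance

def pvWitness_dfs : Int × Int × List (List Bool) × List (List Int) × Int :=
  (0, 0, [[false, false], [false, false]], [[7, 7], [7, 2]], 2)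

def Spec_dfs (r : Int) (c : Int) (visited : List (List Bool)) (board : List (List Int)) (n : Int) (out : Int × Int × Int × Int) : Prop := out = dfs_alt r c visited board n
instance (r : Int) (c : Int) (visited : List (List Bool)) (board : List (List Int)) (n : Int) (out : Int × Int × Int × Int) : Decidable (Spec_dfs r c visited board n out) := by unfold Spec_dfs; infer_instance

-- ===== CLAIM (what is proved, stated in full; the proofs are below) =====
def Claim_equal_dfs : Prop := ∀ (r : Int) (c : Int) (visited : List (List Bool)) (board : List (List Int)) (n : Int), Dom_dfs r c visited board n → Pre_dfs r c visited board n → Spec_dfs r c visited board n (dfs r c visited board n)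

-- ===== LEMMAS AND PROOFS =====

-- ---------- small plumbing lemmas about PySem indexing (specific normal forms for this file) ----------

theorem pvIdx_lt (len : Nat) (i : Int) (w : Nat) (h : PySem.List.pyIdx? len i = some w) :
    w < len := by
  unfold PySem.List.pyIdx? at h
  split_ifs at h <;> simp_all <;> omega

theorem pvIdx_of_inRange (len : Nat) (i : Int) (h : PySem.Raise.InRange len i) :
    ∃ w : Nat, PySem.List.pyIdx? len i = some w := by
  simp [PySem.Raise.InRange] at h
  unfold PySem.List.pyIdx?
  split_ifs with h1 h2 h3
  · exact ⟨i.toNat, rfl⟩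
  · omega
  · exact ⟨len - (-i).toNat, rfl⟩
  · omega

theorem pvIdx_nonneg (len : Nat) (i : Int) (h0 : 0 ≤ i) (h1 : i < (len : Int)) :
    PySem.List.pyIdx? len i = some i.toNat := by
  unfold PySem.List.pyIdx?
  split_ifs <;> first | rfl | omega

theorem pvIdx_none_zero (j : Int) : PySem.List.pyIdx? 0 j = none := by
  unfold PySem.List.pyIdx?
  split_ifs <;> first | rfl | omega

theorem pvSetD_idx {α : Type} (xs : List α) (i : Int) (v : α) (w : Nat)
    (h : PySem.List.pyIdx? xs.length i = some w) :
    PySem.List.pySetD xs i v = xs.set w v := by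
  simp [PySem.List.pySetD, PySem.List.pySet?, h]

theorem pvSetD_idx_none {α : Type} (xs : List α) (i : Int) (v : α)
    (h : PySem.List.pyIdx? xs.length i = none) :
    PySem.List.pySetD xs i v = xs := by
  simp [PySem.List.pySetD, PySem.List.pySet?, h]

theorem pvGetD_idx {α : Type} (xs : List α) (i : Int) (d : α) (w : Nat)
    (h : PySem.List.pyIdx? xs.length i = some w) :
    PySem.List.pyGetD xs i d = xs[w]'(pvIdx_lt _ _ _ h) := by
  simp [PySem.List.pyGetD, PySem.List.pyGet?, h, List.getElem?_eq_getElem (pvIdx_lt _ _ _ h)]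

theorem pvGetD_idx_none {α : Type} (xs : List α) (i : Int) (d : α)
    (h : PySem.List.pyIdx? xs.length i = none) :
    PySem.List.pyGetD xs i d = d := by
  simp [PySem.List.pyGetD, PySem.List.pyGet?, h]

-- ---------- grid shape and marking ----------

-- grid shape: at least n rows, each of length at least n
def pvGrid (v : List (List Bool)) (n : Int) : Prop :=
  n ≤ (v.length : Int) ∧ ∀ (k : Nat) (hk : k < v.length), n ≤ (v[k].length : Int)

theorem pvGrid_pvMark_any (v : List (List Bool)) (n r c : Int) (hg : pvGrid v n) :
    pvGrid (pvMark v r c) n := by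
  obtain ⟨hl, hrow⟩ := hg
  unfold pvMark
  cases hidx : PySem.List.pyIdx? v.length r with
  | none => rw [pvSetD_idx_none _ _ _ hidx]; exact ⟨hl, hrow⟩
  | some w =>
    have hw := pvIdx_lt _ _ _ hidx
    rw [pvGetD_idx _ _ _ _ hidx, pvSetD_idx _ _ _ _ hidx]
    refine ⟨by simpa using hl, ?_⟩
    intro k hk
    simp only [List.length_set] at hk
    rw [List.getElem_set]
    split_ifs with hwk
    · rw [PySem.List.length_pySetD]; exact hrow w hw
    · exact hrow k hk

theorem pvVis_pvMark_self_any (v : List (List Bool)) (r c : Int)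
    (h1 : PySem.Raise.InRange v.length r)
    (h2 : PySem.Raise.InRange (PySem.List.pyGetD v r []).length c) :
    pvVis (pvMark v r c) r c = true := by
  obtain ⟨w, hw⟩ := pvIdx_of_inRange _ _ h1
  have hwlt := pvIdx_lt _ _ _ hw
  obtain ⟨wc, hwc⟩ := pvIdx_of_inRange _ _ h2
  rw [pvGetD_idx _ _ _ _ hw] at hwc
  have hwclt := pvIdx_lt _ _ _ hwc
  have hmark : pvMark v r c = v.set w (v[w].set wc true) := by
    unfold pvMark
    rw [pvGetD_idx _ _ _ _ hw, pvSetD_idx _ _ _ _ hwc, pvSetD_idx _ _ _ _ hw]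
  unfold pvVis
  rw [hmark]
  have h3 : PySem.List.pyIdx? (v.set w (v[w].set wc true)).length r = some w := by
    rw [List.length_set]; exact hw
  rw [pvGetD_idx _ _ _ _ h3]
  rw [List.getElem_set_self]
  have h4 : PySem.List.pyIdx? (v[w].set wc true).length c = some wc := by
    rw [List.length_set]; exact hwc
  rw [pvGetD_idx _ _ _ _ h4]
  rw [List.getElem_set_self]

theorem pvVis_mark_mono (v : List (List Bool)) (r c i j : Int) (h : pvVis v i j = true) :
    pvVis (pvMark v r c) i j = true := by
  unfold pvVis at h ⊢
  unfold pvMark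
  cases hidx : PySem.List.pyIdx? v.length r with
  | none => rw [pvSetD_idx_none _ _ _ hidx]; exact h
  | some w =>
    have hw := pvIdx_lt _ _ _ hidx
    rw [pvGetD_idx _ _ _ _ hidx, pvSetD_idx _ _ _ _ hidx]
    set rowM := PySem.List.pySetD v[w] c true with hrowM
    cases hidx2 : PySem.List.pyIdx? v.length i with
    | none =>
      have : PySem.List.pyIdx? (v.set w rowM).length i = none := by rw [List.length_set]; exact hidx2
      rw [pvGetD_idx_none _ _ _ this]
      rw [pvGetD_idx_none ([] : List Bool) j true (by simpa using pvIdx_none_zero j)]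
    | some wi =>
      have hwi := pvIdx_lt _ _ _ hidx2
      have h5 : PySem.List.pyIdx? (v.set w rowM).length i = some wi := by
        rw [List.length_set]; exact hidx2
      rw [pvGetD_idx _ _ _ _ h5]
      rw [pvGetD_idx _ _ _ _ hidx2] at h
      rw [List.getElem_set]
      split_ifs with hww
      · -- reading the modified row; h is about v[wi] = v[w]
        subst hww
        cases hidx3 : PySem.List.pyIdx? (v[w].length) c with
        | none => rw [hrowM, pvSetD_idx_none _ _ _ hidx3]; exact h
        | some wc =>
          have hwc := pvIdx_lt _ _ _ hidx3
          rw [hrowM, pvSetD_idx _ _ _ _ hidx3]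
          cases hidx4 : PySem.List.pyIdx? (v[w].length) j with
          | none =>
            rw [pvGetD_idx_none _ _ _ (by rw [List.length_set]; exact hidx4)]
          | some wj =>
            have hwj := pvIdx_lt _ _ _ hidx4
            rw [pvGetD_idx _ _ _ _ hidx4] at h
            rw [pvGetD_idx _ _ _ _ (by rw [List.length_set]; exact hidx4)]
            rw [List.getElem_set]
            split_ifs with hcc
            · rfl
            · exact h
      · exact h

-- in-grid marking: exactly one new cell becomes visited
theorem pvVis_pvMark_grid (v : List (List Bool)) (n a b i j : Int) (hg : pvGrid v n)
    (ha0 : 0 ≤ a) (ha1 : a < n) (hb0 : 0 ≤ b) (hb1 : b < n)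
    (hi0 : 0 ≤ i) (hi1 : i < n) (hj0 : 0 ≤ j) (hj1 : j < n) :
    pvVis (pvMark v a b) i j = if a = i ∧ b = j then true else pvVis v i j := by
  obtain ⟨hl, hrow⟩ := hg
  have hwa : a.toNat < v.length := by omega
  have hwi : i.toNat < v.length := by omega
  have hia : PySem.List.pyIdx? v.length a = some a.toNat := pvIdx_nonneg _ _ ha0 (by omega)
  have hii : PySem.List.pyIdx? v.length i = some i.toNat := pvIdx_nonneg _ _ hi0 (by omega)
  have hra := hrow a.toNat hwa
  have hri := hrow i.toNat hwi
  have hib : PySem.List.pyIdx? (v[a.toNat].length) b = some b.toNat := pvIdx_nonneg _ _ hb0 (by omega)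
  have hij : PySem.List.pyIdx? (v[i.toNat].length) j = some j.toNat := pvIdx_nonneg _ _ hj0 (by omega)
  have hmark : pvMark v a b = v.set a.toNat (v[a.toNat].set b.toNat true) := by
    unfold pvMark
    rw [pvGetD_idx _ _ _ _ hia, pvSetD_idx _ _ _ _ hib, pvSetD_idx _ _ _ _ hia]
  unfold pvVis
  rw [hmark]
  rw [pvGetD_idx _ _ _ _ (show PySem.List.pyIdx? (v.set a.toNat (v[a.toNat].set b.toNat true)).length i = some i.toNat by rw [List.length_set]; exact hii)]
  rw [List.getElem_set]
  by_cases hai : a = i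
  · subst hai
    rw [if_pos rfl]
    rw [pvGetD_idx _ _ _ _ (show PySem.List.pyIdx? (v[a.toNat].set b.toNat true).length j = some j.toNat by rw [List.length_set]; exact hij)]
    rw [List.getElem_set]
    by_cases hbj : b = j
    · subst hbj
      rw [if_pos rfl, if_pos ⟨rfl, rfl⟩]
    · rw [if_neg (by omega), if_neg (by tauto)]
      rw [pvGetD_idx _ _ _ _ hii, pvGetD_idx _ _ _ _ hij]
  · rw [if_neg (by omega), if_neg (by tauto)]
    rw [pvGetD_idx _ _ _ _ hii]
-- ---------- the traversal-order-independent core: reachable set of the flood fill ----------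

-- a cell the fill may enter: in grid, right shape, unvisited in the post-start-mark grid v0
def pvFree (board : List (List Int)) (n shape : Int) (v0 : List (List Bool)) (p : Int × Int) : Prop :=
  0 ≤ p.1 ∧ p.1 < n ∧ 0 ≤ p.2 ∧ p.2 < n ∧ pvCell board p.1 p.2 = shape ∧ pvVis v0 p.1 p.2 = false

inductive pvReach (board : List (List Int)) (n shape : Int) (v0 : List (List Bool)) (start : Int × Int) : Int × Int → Prop
  | base : pvReach board n shape v0 start start
  | step (p q m : Int × Int) : pvReach board n shape v0 start p → m ∈ pvMoves →
      q = (p.1 + m.1, p.2 + m.2) → pvFree board n shape v0 q → pvReach board n shape v0 start q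

-- generic worklist step/loop, parameterised by how the pending list is pushed
-- (A pushes at the head = stack, B pushes at the back = queue); cells records discovery order
def pvGStep (push : List (Int × Int) → Int × Int → List (Int × Int)) (board : List (List Int)) (shape n cr cc : Int)
    (s : List (List Bool) × List (Int × Int) × List (Int × Int)) (m : Int × Int) :
    List (List Bool) × List (Int × Int) × List (Int × Int) :=
  let nr := cr + m.1
  let nc := cc + m.2
  if 0 ≤ nr ∧ nr < n ∧ 0 ≤ nc ∧ nc < n ∧ pvCell board nr nc = shape ∧ pvVis s.1 nr nc = false then
    (pvMark s.1 nr nc, push s.2.1 (nr, nc), s.2.2 ++ [(nr, nc)])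
  else s

def pvGLoop (push : List (Int × Int) → Int × Int → List (Int × Int)) (board : List (List Int)) (shape n : Int) :
    Nat → List (List Bool) × List (Int × Int) × List (Int × Int) →
      List (List Bool) × List (Int × Int) × List (Int × Int)
  | 0, s => s
  | fuel + 1, s =>
    match s.2.1 with
    | [] => s
    | p :: pend => pvGLoop push board shape n fuel (pvMoves.foldl (pvGStep push board shape n p.1 p.2) (s.1, pend, s.2.2))

-- loop invariant (between iterations)
def pvInv (board : List (List Int)) (n shape : Int) (v0 : List (List Bool)) (start : Int × Int)
    (s : List (List Bool) × List (Int × Int) × List (Int × Int)) : Prop :=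
  s.2.2.head? = some start ∧
  (∀ q ∈ s.2.2.tail, pvFree board n shape v0 q) ∧
  s.2.2.Nodup ∧
  (∀ q ∈ s.2.2, pvReach board n shape v0 start q) ∧
  (∀ q ∈ s.2.1, q ∈ s.2.2) ∧
  (∀ i j : Int, 0 ≤ i → i < n → 0 ≤ j → j < n →
      (pvVis s.1 i j = true ↔ (pvVis v0 i j = true ∨ (i, j) ∈ s.2.2.tail))) ∧
  (∀ x ∈ s.2.2, x ∉ s.2.1 → ∀ m ∈ pvMoves, pvFree board n shape v0 (x.1 + m.1, x.2 + m.2) →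
      (x.1 + m.1, x.2 + m.2) ∈ s.2.2) ∧
  pvGrid s.1 n

-- invariant while the moves of the popped cell p are being processed
def pvMid (board : List (List Int)) (n shape : Int) (v0 : List (List Bool)) (start p : Int × Int)
    (s : List (List Bool) × List (Int × Int) × List (Int × Int)) : Prop :=
  s.2.2.head? = some start ∧
  (∀ q ∈ s.2.2.tail, pvFree board n shape v0 q) ∧
  s.2.2.Nodup ∧
  (∀ q ∈ s.2.2, pvReach board n shape v0 start q) ∧
  (∀ q ∈ s.2.1, q ∈ s.2.2) ∧
  (∀ i j : Int, 0 ≤ i → i < n → 0 ≤ j → j < n →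
      (pvVis s.1 i j = true ↔ (pvVis v0 i j = true ∨ (i, j) ∈ s.2.2.tail))) ∧
  (∀ x ∈ s.2.2, x ≠ p → x ∉ s.2.1 → ∀ m ∈ pvMoves, pvFree board n shape v0 (x.1 + m.1, x.2 + m.2) →
      (x.1 + m.1, x.2 + m.2) ∈ s.2.2) ∧
  pvGrid s.1 n ∧ p ∈ s.2.2 ∧ pvReach board n shape v0 start p

theorem pvMid_step (push : List (Int × Int) → Int × Int → List (Int × Int))
    (Hpush : ∀ (l : List (Int × Int)) (x y : Int × Int), y ∈ push l x ↔ y = x ∨ y ∈ l)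
    (Hlen : ∀ (l : List (Int × Int)) (x : Int × Int), (push l x).length = l.length + 1)
    (board : List (List Int)) (n shape : Int) (v0 : List (List Bool)) (start p : Int × Int)
    (Hstart : pvVis v0 start.1 start.2 = true)
    (s : List (List Bool) × List (Int × Int) × List (Int × Int)) (m : Int × Int) (hm : m ∈ pvMoves)
    (h : pvMid board n shape v0 start p s) :
    pvMid board n shape v0 start p (pvGStep push board shape n p.1 p.2 s m) ∧
    (∀ x ∈ s.2.2, x ∈ (pvGStep push board shape n p.1 p.2 s m).2.2) ∧
    (∀ x ∈ s.2.1, x ∈ (pvGStep push board shape n p.1 p.2 s m).2.1) ∧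
    (pvFree board n shape v0 (p.1 + m.1, p.2 + m.2) → (p.1 + m.1, p.2 + m.2) ∈ (pvGStep push board shape n p.1 p.2 s m).2.2) ∧
    ((pvGStep push board shape n p.1 p.2 s m).2.2.length + s.2.1.length
       = s.2.2.length + (pvGStep push board shape n p.1 p.2 s m).2.1.length) := by
  obtain ⟨hhead, htail, hnd, hreach, hpend, hvis, hclosed, hgrid, hpmem, hpreach⟩ := h
  obtain ⟨t, ht⟩ : ∃ t, s.2.2 = start :: t := by
    cases hc : s.2.2 with
    | nil => rw [hc] at hhead; simp at hhead
    | cons x t => rw [hc] at hhead; simp at hhead; exact ⟨t, by rw [hhead]⟩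
  have httail : s.2.2.tail = t := by rw [ht]; rfl
  by_cases hc : 0 ≤ p.1 + m.1 ∧ p.1 + m.1 < n ∧ 0 ≤ p.2 + m.2 ∧ p.2 + m.2 < n ∧
      pvCell board (p.1 + m.1) (p.2 + m.2) = shape ∧ pvVis s.1 (p.1 + m.1) (p.2 + m.2) = false
  · obtain ⟨h1, h2, h3, h4, h5, h6⟩ := hc
    have hstep : pvGStep push board shape n p.1 p.2 s m
        = (pvMark s.1 (p.1 + m.1) (p.2 + m.2), push s.2.1 (p.1 + m.1, p.2 + m.2), s.2.2 ++ [(p.1 + m.1, p.2 + m.2)]) := by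
      unfold pvGStep
      rw [if_pos ⟨h1, h2, h3, h4, h5, h6⟩]
    have hnor : ¬ (pvVis v0 (p.1 + m.1) (p.2 + m.2) = true ∨ (p.1 + m.1, p.2 + m.2) ∈ s.2.2.tail) := by
      intro hor
      rw [(hvis _ _ h1 h2 h3 h4).mpr hor] at h6
      exact Bool.true_eq_false.mp h6
    push_neg at hnor
    obtain ⟨hv0, hnt⟩ := hnor
    have hv0' : pvVis v0 (p.1 + m.1) (p.2 + m.2) = false := by
      cases hb : pvVis v0 (p.1 + m.1) (p.2 + m.2) with
      | false => rfl
      | true => exact absurd hb hv0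
    have hfree : pvFree board n shape v0 (p.1 + m.1, p.2 + m.2) := ⟨h1, h2, h3, h4, h5, hv0'⟩
    have hnstart : (p.1 + m.1, p.2 + m.2) ≠ start := by
      intro he
      rw [show p.1 + m.1 = start.1 by rw [← he], show p.2 + m.2 = start.2 by rw [← he]] at hv0'
      rw [Hstart] at hv0'
      exact Bool.true_eq_false.mp hv0'
    have hnmem : (p.1 + m.1, p.2 + m.2) ∉ s.2.2 := by
      rw [ht]
      intro hmem
      rcases List.mem_cons.mp hmem with he | hmt
      · exact hnstart he
      · rw [httail] at hnt; exact hnt hmt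
    rw [hstep]
    refine ⟨⟨?_, ?_, ?_, ?_, ?_, ?_, ?_, ?_, ?_, ?_⟩, ?_, ?_, ?_, ?_⟩
    · rw [ht]; simp
    · rw [ht]
      simp only [List.tail_cons]
      intro q hq
      rcases List.mem_append.mp hq with hq | hq
      · exact htail q (by rw [httail]; exact hq)
      · rw [List.mem_singleton.mp hq]; exact hfree
    · rw [List.nodup_append]
      refine ⟨hnd, by simp, ?_⟩
      intro a ha b hb he
      rw [List.mem_singleton.mp hb] at he
      exact hnmem (he ▸ ha)
    · intro q hq
      rcases List.mem_append.mp hq with hq | hq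
      · exact hreach q hq
      · rw [List.mem_singleton.mp hq]
        exact pvReach.step p _ m hpreach hm rfl hfree
    · intro q hq
      rcases (Hpush _ _ _).mp hq with hq | hq
      · rw [hq]; exact List.mem_append_right _ (by simp)
      · exact List.mem_append_left _ (hpend q hq)
    · intro i j hi0 hi1 hj0 hj1
      rw [pvVis_pvMark_grid s.1 n _ _ i j hgrid h1 h2 h3 h4 hi0 hi1 hj0 hj1]
      have htl : (s.2.2 ++ [(p.1 + m.1, p.2 + m.2)]).tail = t ++ [(p.1 + m.1, p.2 + m.2)] := by
        rw [ht]; simp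
      rw [htl]
      by_cases hij : p.1 + m.1 = i ∧ p.2 + m.2 = j
      · rw [if_pos hij]
        constructor
        · intro _
          right
          rw [← hij.1, ← hij.2]
          simp
        · intro _; rfl
      · rw [if_neg hij]
        rw [hvis i j hi0 hi1 hj0 hj1, httail]
        have : ((i, j) ∈ t ++ [(p.1 + m.1, p.2 + m.2)]) ↔ (i, j) ∈ t := by
          simp only [List.mem_append, List.mem_singleton]
          constructor
          · rintro (hh | hh)
            · exact hh
            · exact absurd ⟨congrArg Prod.fst hh.symm, congrArg Prod.snd hh.symm⟩ hij
          · exact Or.inl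
        rw [this]
    · intro x hx hxp hxpend mm hmm hfreem
      rcases List.mem_append.mp hx with hx | hx
      · have hxp1 : x ∉ s.2.1 := fun hx1 => hxpend ((Hpush _ _ _).mpr (Or.inr hx1))
        exact List.mem_append_left _ (hclosed x hx hxp hxp1 mm hmm hfreem)
      · exfalso
        exact hxpend ((Hpush _ _ _).mpr (Or.inl (List.mem_singleton.mp hx)))
    · exact pvGrid_pvMark_any s.1 n _ _ hgrid
    · exact List.mem_append_left _ hpmem
    · exact hpreach
    · intro x hx; exact List.mem_append_left _ hx
    · intro x hx; exact (Hpush _ _ _).mpr (Or.inr hx)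
    · intro _; exact List.mem_append_right _ (by simp)
    · rw [List.length_append, Hlen]
      simp
      omega
  · have hstep : pvGStep push board shape n p.1 p.2 s m = s := by
      unfold pvGStep
      rw [if_neg hc]
    rw [hstep]
    refine ⟨⟨hhead, htail, hnd, hreach, hpend, hvis, hclosed, hgrid, hpmem, hpreach⟩,
      fun x hx => hx, fun x hx => hx, ?_, rfl⟩
    intro hfree
    obtain ⟨h1, h2, h3, h4, h5, hv0⟩ := hfree
    have hvt : pvVis s.1 (p.1 + m.1) (p.2 + m.2) = true := by
      cases hb : pvVis s.1 (p.1 + m.1) (p.2 + m.2) with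
      | true => rfl
      | false => exact absurd ⟨h1, h2, h3, h4, h5, hb⟩ hc
    rcases (hvis _ _ h1 h2 h3 h4).mp hvt with hv | hv
    · rw [hv0] at hv; exact absurd hv (by simp)
    · rw [ht]
      rw [httail] at hv
      exact List.mem_cons_of_mem _ hv
theorem pvMid_fold (push : List (Int × Int) → Int × Int → List (Int × Int))
    (Hpush : ∀ (l : List (Int × Int)) (x y : Int × Int), y ∈ push l x ↔ y = x ∨ y ∈ l)
    (Hlen : ∀ (l : List (Int × Int)) (x : Int × Int), (push l x).length = l.length + 1)
    (board : List (List Int)) (n shape : Int) (v0 : List (List Bool)) (start p : Int × Int)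
    (Hstart : pvVis v0 start.1 start.2 = true) :
    ∀ (ms : List (Int × Int)) (s : List (List Bool) × List (Int × Int) × List (Int × Int)),
      (∀ m ∈ ms, m ∈ pvMoves) → pvMid board n shape v0 start p s →
      pvMid board n shape v0 start p (ms.foldl (pvGStep push board shape n p.1 p.2) s) ∧
      (∀ x ∈ s.2.2, x ∈ (ms.foldl (pvGStep push board shape n p.1 p.2) s).2.2) ∧
      (∀ m ∈ ms, pvFree board n shape v0 (p.1 + m.1, p.2 + m.2) →
        (p.1 + m.1, p.2 + m.2) ∈ (ms.foldl (pvGStep push board shape n p.1 p.2) s).2.2) ∧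
      ((ms.foldl (pvGStep push board shape n p.1 p.2) s).2.2.length + s.2.1.length
        = s.2.2.length + (ms.foldl (pvGStep push board shape n p.1 p.2) s).2.1.length) := by
  intro ms
  induction ms with
  | nil =>
    intro s _ h
    exact ⟨h, fun x hx => hx, by simp, rfl⟩
  | cons m ms ih =>
    intro s hms h
    have hstep := pvMid_step push Hpush Hlen board n shape v0 start p Hstart s m
      (hms m List.mem_cons_self) h
    obtain ⟨h1, hmono2, _, hg, hlen1⟩ := hstep
    have hih := ih (pvGStep push board shape n p.1 p.2 s m)
      (fun m' hm' => hms m' (List.mem_cons_of_mem _ hm')) h1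
    obtain ⟨h2, hmono, hms', hlen2⟩ := hih
    rw [List.foldl_cons]
    refine ⟨h2, fun x hx => hmono _ (hmono2 _ hx), ?_, by omega⟩
    intro m' hm' hfree
    rcases List.mem_cons.mp hm' with he | hm''
    · subst he
      exact hmono _ (hg hfree)
    · exact hms' m' hm'' hfree

theorem pvInv_iter (push : List (Int × Int) → Int × Int → List (Int × Int))
    (Hpush : ∀ (l : List (Int × Int)) (x y : Int × Int), y ∈ push l x ↔ y = x ∨ y ∈ l)
    (Hlen : ∀ (l : List (Int × Int)) (x : Int × Int), (push l x).length = l.length + 1)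
    (board : List (List Int)) (n shape : Int) (v0 : List (List Bool)) (start p : Int × Int)
    (Hstart : pvVis v0 start.1 start.2 = true)
    (vis : List (List Bool)) (pend cells : List (Int × Int))
    (h : pvInv board n shape v0 start (vis, p :: pend, cells)) :
    pvInv board n shape v0 start (pvMoves.foldl (pvGStep push board shape n p.1 p.2) (vis, pend, cells)) ∧
    (∀ x ∈ cells, x ∈ (pvMoves.foldl (pvGStep push board shape n p.1 p.2) (vis, pend, cells)).2.2) ∧
    ((pvMoves.foldl (pvGStep push board shape n p.1 p.2) (vis, pend, cells)).2.2.length + pend.length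
      = cells.length + (pvMoves.foldl (pvGStep push board shape n p.1 p.2) (vis, pend, cells)).2.1.length) := by
  obtain ⟨hhead, htail, hnd, hreach, hpend, hvis, hclosed, hgrid⟩ := h
  have hpmem : p ∈ cells := hpend p List.mem_cons_self
  have hmid : pvMid board n shape v0 start p (vis, pend, cells) := by
    refine ⟨hhead, htail, hnd, hreach, fun q hq => hpend q (List.mem_cons_of_mem _ hq), hvis, ?_,
      hgrid, hpmem, hreach p hpmem⟩
    intro x hx hxp hxpend mm hmm hfree
    exact hclosed x hx (by simp [hxp, hxpend]) mm hmm hfree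
  have hfold := pvMid_fold push Hpush Hlen board n shape v0 start p Hstart pvMoves
    (vis, pend, cells) (fun m hm => hm) hmid
  obtain ⟨hmid', hmono, hmoves, hlen⟩ := hfold
  obtain ⟨ha, hb, hcn, hd, he, hf, hclosed', hg, _, hpreach⟩ := hmid'
  refine ⟨⟨ha, hb, hcn, hd, he, hf, ?_, hg⟩, hmono, by simpa using hlen⟩
  intro x hx hxpend mm hmm hfree
  by_cases hxp : x = p
  · subst hxp
    exact hmoves mm hmm hfree
  · exact hclosed' x hx hxp hxpend mm hmm hfree

theorem pvCells_bound (board : List (List Int)) (n shape : Int) (v0 : List (List Bool)) (start : Int × Int)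
    (s : List (List Bool) × List (Int × Int) × List (Int × Int))
    (h : pvInv board n shape v0 start s) :
    s.2.2.length ≤ n.toNat * n.toNat + 1 := by
  obtain ⟨hhead, htail, hnd, _⟩ := h
  obtain ⟨t, ht⟩ : ∃ t, s.2.2 = start :: t := by
    cases hc : s.2.2 with
    | nil => rw [hc] at hhead; simp at hhead
    | cons x t => rw [hc] at hhead; simp at hhead; exact ⟨t, by rw [hhead]⟩
  have htnd : t.Nodup := by
    rw [ht] at hnd
    exact (List.nodup_cons.mp hnd).2
  have htfree : ∀ q ∈ t, pvFree board n shape v0 q := by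
    intro q hq
    exact htail q (by rw [ht]; simpa using hq)
  by_cases hte : t = []
  · rw [ht, hte]; simp
  -- encode in-grid cells injectively
  obtain ⟨a, ha⟩ := List.exists_mem_of_ne_nil t hte
  have hn0 : 0 < n.toNat := by
    obtain ⟨h1, h2, h3, h4, _, _⟩ := htfree a ha
    omega
  have hmapnd : (t.map (fun q : Int × Int => q.1.toNat * n.toNat + q.2.toNat)).Nodup := by
    refine List.Nodup.map_on ?_ htnd
    intro q1 hq1 q2 hq2 he
    obtain ⟨a0, a1, b0, b1, _, _⟩ := htfree q1 hq1
    obtain ⟨c0, c1, d0, d1, _, _⟩ := htfree q2 hq2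
    have hb : q1.2.toNat < n.toNat := by omega
    have hd : q2.2.toNat < n.toNat := by omega
    have h1 : (q1.1.toNat * n.toNat + q1.2.toNat) / n.toNat = q1.1.toNat := by
      rw [Nat.mul_comm q1.1.toNat n.toNat, Nat.mul_add_div hn0, Nat.div_eq_of_lt hb, Nat.add_zero]
    have h2 : (q2.1.toNat * n.toNat + q2.2.toNat) / n.toNat = q2.1.toNat := by
      rw [Nat.mul_comm q2.1.toNat n.toNat, Nat.mul_add_div hn0, Nat.div_eq_of_lt hd, Nat.add_zero]
    have hfst : q1.1.toNat = q2.1.toNat := by rw [← h1, ← h2, he]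
    have hsnd : q1.2.toNat = q2.2.toNat := by rw [hfst] at he; omega
    have : q1.1 = q2.1 := by omega
    have : q1.2 = q2.2 := by omega
    exact Prod.ext ‹q1.1 = q2.1› ‹q1.2 = q2.2›
  have hbound : ∀ x ∈ t.map (fun q : Int × Int => q.1.toNat * n.toNat + q.2.toNat),
      x < n.toNat * n.toNat := by
    intro x hx
    obtain ⟨q, hq, he⟩ := List.mem_map.mp hx
    obtain ⟨a0, a1, b0, b1, _, _⟩ := htfree q hq
    have h1 : q.1.toNat + 1 ≤ n.toNat := by omega
    have h2 : q.2.toNat < n.toNat := by omega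
    calc x = q.1.toNat * n.toNat + q.2.toNat := he.symm
      _ < q.1.toNat * n.toNat + n.toNat := by omega
      _ = (q.1.toNat + 1) * n.toNat := by ring
      _ ≤ n.toNat * n.toNat := Nat.mul_le_mul_right _ h1
  have hlen : t.length ≤ n.toNat * n.toNat := by
    have h1 : (t.map (fun q : Int × Int => q.1.toNat * n.toNat + q.2.toNat)).toFinset.card
        = t.length := by
      rw [List.toFinset_card_of_nodup hmapnd, List.length_map]
    have h2 : (t.map (fun q : Int × Int => q.1.toNat * n.toNat + q.2.toNat)).toFinset
        ⊆ Finset.range (n.toNat * n.toNat) := by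
      intro x hx
      rw [Finset.mem_range]
      exact hbound x (List.mem_toFinset.mp hx)
    have := Finset.card_le_card h2
    rw [h1, Finset.card_range] at this
    exact this
  rw [ht]
  simp only [List.length_cons]
  omega

theorem pvGLoop_run (push : List (Int × Int) → Int × Int → List (Int × Int))
    (Hpush : ∀ (l : List (Int × Int)) (x y : Int × Int), y ∈ push l x ↔ y = x ∨ y ∈ l)
    (Hlen : ∀ (l : List (Int × Int)) (x : Int × Int), (push l x).length = l.length + 1)
    (board : List (List Int)) (n shape : Int) (v0 : List (List Bool)) (start : Int × Int)
    (Hstart : pvVis v0 start.1 start.2 = true) :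
    ∀ (fuel : Nat) (s : List (List Bool) × List (Int × Int) × List (Int × Int)),
      pvInv board n shape v0 start s →
      n.toNat * n.toNat + 1 + s.2.1.length - s.2.2.length ≤ fuel →
      pvInv board n shape v0 start (pvGLoop push board shape n fuel s) ∧
      (pvGLoop push board shape n fuel s).2.1 = [] ∧
      (∀ x ∈ s.2.2, x ∈ (pvGLoop push board shape n fuel s).2.2) := by
  intro fuel
  induction fuel with
  | zero =>
    intro s h hf
    have hb := pvCells_bound board n shape v0 start s h
    have hp : s.2.1.length = 0 := by omega
    exact ⟨h, List.eq_nil_of_length_eq_zero hp, fun x hx => hx⟩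
  | succ fuel ih =>
    intro s h hf
    obtain ⟨vis, sp, cells⟩ := s
    cases hp : sp with
    | nil =>
      subst hp
      exact ⟨h, rfl, fun x hx => hx⟩
    | cons p pend =>
      subst hp
      have hiter := pvInv_iter push Hpush Hlen board n shape v0 start p Hstart vis pend cells h
      obtain ⟨hinv, hmono, hlen⟩ := hiter
      have hb := pvCells_bound board n shape v0 start _ hinv
      have hstep : pvGLoop push board shape n (fuel + 1) (vis, p :: pend, cells)
          = pvGLoop push board shape n fuel (pvMoves.foldl (pvGStep push board shape n p.1 p.2) (vis, pend, cells)) := rfl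
      rw [hstep]
      have hf' : n.toNat * n.toNat + 1
            + (pvMoves.foldl (pvGStep push board shape n p.1 p.2) (vis, pend, cells)).2.1.length
            - (pvMoves.foldl (pvGStep push board shape n p.1 p.2) (vis, pend, cells)).2.2.length ≤ fuel := by
        simp only [List.length_cons] at hf
        omega
      obtain ⟨h1, h2, h3⟩ := ih _ hinv hf'
      exact ⟨h1, h2, fun x hx => h3 _ (hmono _ hx)⟩

theorem pvGLoop_mem (push : List (Int × Int) → Int × Int → List (Int × Int))
    (Hpush : ∀ (l : List (Int × Int)) (x y : Int × Int), y ∈ push l x ↔ y = x ∨ y ∈ l)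
    (Hlen : ∀ (l : List (Int × Int)) (x : Int × Int), (push l x).length = l.length + 1)
    (board : List (List Int)) (n shape : Int) (v0 : List (List Bool)) (start : Int × Int)
    (Hstart : pvVis v0 start.1 start.2 = true)
    (fuel : Nat) (s : List (List Bool) × List (Int × Int) × List (Int × Int))
    (h : pvInv board n shape v0 start s)
    (hf : n.toNat * n.toNat + 1 + s.2.1.length - s.2.2.length ≤ fuel) :
    ∀ q, q ∈ (pvGLoop push board shape n fuel s).2.2 ↔ pvReach board n shape v0 start q := by
  obtain ⟨hres, hpend, _⟩ := pvGLoop_run push Hpush Hlen board n shape v0 start Hstart fuel s h hf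
  obtain ⟨hhead, _, _, hreach, _, _, hclosed, _⟩ := hres
  intro q
  constructor
  · exact hreach q
  · intro hq
    induction hq with
    | base =>
      cases hc : (pvGLoop push board shape n fuel s).2.2 with
      | nil => rw [hc] at hhead; simp at hhead
      | cons x t =>
        rw [hc] at hhead
        simp at hhead
        rw [hhead]
        exact List.mem_cons_self
    | step p q' m hp hm he hfree ihp =>
      rw [he]
      exact hclosed p ihp (by rw [hpend]; exact List.not_mem_nil) m hm (by rw [← he]; exact hfree)
-- ---------- extrema over lists with equal membership ----------

theorem pvMinI_congr (l1 l2 : List Int) (h : ∀ x, x ∈ l1 ↔ x ∈ l2) (hne : l1 ≠ []) :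
    pvMinI l1 = pvMinI l2 := by
  obtain ⟨x1, t1, he1⟩ := List.exists_cons_of_ne_nil hne
  have hne2 : l2 ≠ [] := by
    intro he2
    have := (h x1).mp (by rw [he1]; exact List.mem_cons_self)
    rw [he2] at this
    exact List.not_mem_nil this
  obtain ⟨x2, t2, he2⟩ := List.exists_cons_of_ne_nil hne2
  have hm1 : PySem.List.min? l1 (fun y => y) = some (t1.foldl min x1) := by
    rw [he1]; exact PySem.List.min?_id_cons x1 t1
  have hm2 : PySem.List.min? l2 (fun y => y) = some (t2.foldl min x2) := by
    rw [he2]; exact PySem.List.min?_id_cons x2 t2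
  have hmem1 := PySem.List.min?_mem hm1
  have hmem2 := PySem.List.min?_mem hm2
  have hle1 := PySem.List.min?_isMin hm1 _ ((h _).mpr hmem2)
  have hle2 := PySem.List.min?_isMin hm2 _ ((h _).mp hmem1)
  unfold pvMinI
  rw [hm1, hm2]
  simp only [Option.getD_some]
  omega

theorem pvMaxI_congr (l1 l2 : List Int) (h : ∀ x, x ∈ l1 ↔ x ∈ l2) (hne : l1 ≠ []) :
    pvMaxI l1 = pvMaxI l2 := by
  obtain ⟨x1, t1, he1⟩ := List.exists_cons_of_ne_nil hne
  have hne2 : l2 ≠ [] := by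
    intro he2
    have := (h x1).mp (by rw [he1]; exact List.mem_cons_self)
    rw [he2] at this
    exact List.not_mem_nil this
  obtain ⟨x2, t2, he2⟩ := List.exists_cons_of_ne_nil hne2
  have hm1 : PySem.List.max? l1 (fun y => y) = some (t1.foldl max x1) := by
    rw [he1]; exact PySem.List.max?_id_cons x1 t1
  have hm2 : PySem.List.max? l2 (fun y => y) = some (t2.foldl max x2) := by
    rw [he2]; exact PySem.List.max?_id_cons x2 t2
  have hmem1 := PySem.List.max?_mem hm1
  have hmem2 := PySem.List.max?_mem hm2
  have hle1 := PySem.List.max?_isMax hm1 _ ((h _).mpr hmem2)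
  have hle2 := PySem.List.max?_isMax hm2 _ ((h _).mp hmem1)
  unfold pvMaxI
  rw [hm1, hm2]
  simp only [Option.getD_some]
  omega

-- the bounding box of a cells list (what both ports return in the end)
def pvExtract (cells : List (Int × Int)) : Int × Int × Int × Int :=
  (pvMinI (cells.map Prod.fst), pvMinI (cells.map Prod.snd),
   pvMaxI (cells.map Prod.fst), pvMaxI (cells.map Prod.snd))

theorem pvExtract_congr (l1 l2 : List (Int × Int)) (h : ∀ x, x ∈ l1 ↔ x ∈ l2) (hne : l1 ≠ []) :
    pvExtract l1 = pvExtract l2 := by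
  have hf : ∀ x, x ∈ l1.map Prod.fst ↔ x ∈ l2.map Prod.fst := by
    intro x
    simp only [List.mem_map]
    exact ⟨fun ⟨q, hq, he⟩ => ⟨q, (h q).mp hq, he⟩, fun ⟨q, hq, he⟩ => ⟨q, (h q).mpr hq, he⟩⟩
  have hs : ∀ x, x ∈ l1.map Prod.snd ↔ x ∈ l2.map Prod.snd := by
    intro x
    simp only [List.mem_map]
    exact ⟨fun ⟨q, hq, he⟩ => ⟨q, (h q).mp hq, he⟩, fun ⟨q, hq, he⟩ => ⟨q, (h q).mpr hq, he⟩⟩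
  have hnf : l1.map Prod.fst ≠ [] := by simpa using hne
  have hns : l1.map Prod.snd ≠ [] := by simpa using hne
  unfold pvExtract
  rw [pvMinI_congr _ _ hf hnf, pvMinI_congr _ _ hs hns, pvMaxI_congr _ _ hf hnf, pvMaxI_congr _ _ hs hns]
-- ---------- bridge: port A (stack, inline min/max) is the generic loop with a head push ----------

theorem pvMinI_append (l : List Int) (a : Int) (h : l ≠ []) :
    pvMinI (l ++ [a]) = min (pvMinI l) a := by
  obtain ⟨x, t, he⟩ := List.exists_cons_of_ne_nil h
  subst he
  unfold pvMinI
  rw [List.cons_append, PySem.List.min?_id_cons, PySem.List.min?_id_cons]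
  simp only [Option.getD_some]
  rw [List.foldl_append]
  simp

theorem pvMaxI_append (l : List Int) (a : Int) (h : l ≠ []) :
    pvMaxI (l ++ [a]) = max (pvMaxI l) a := by
  obtain ⟨x, t, he⟩ := List.exists_cons_of_ne_nil h
  subst he
  unfold pvMaxI
  rw [List.cons_append, PySem.List.max?_id_cons, PySem.List.max?_id_cons]
  simp only [Option.getD_some]
  rw [List.foldl_append]
  simp

theorem pvStepA_R (board : List (List Int)) (shape n cr cc : Int)
    (sA : List (List Bool) × List (Int × Int) × Int × Int × Int × Int)
    (sg : List (List Bool) × List (Int × Int) × List (Int × Int)) (m : Int × Int)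
    (hv : sA.1 = sg.1) (hq : sA.2.1 = sg.2.1) (hne : sg.2.2 ≠ [])
    (h1 : sA.2.2.1 = pvMinI (sg.2.2.map Prod.fst))
    (h2 : sA.2.2.2.1 = pvMaxI (sg.2.2.map Prod.fst))
    (h3 : sA.2.2.2.2.1 = pvMinI (sg.2.2.map Prod.snd))
    (h4 : sA.2.2.2.2.2 = pvMaxI (sg.2.2.map Prod.snd)) :
    (pvStepA board shape n cr cc sA m).1 = (pvGStep (fun l x => x :: l) board shape n cr cc sg m).1 ∧
    (pvStepA board shape n cr cc sA m).2.1 = (pvGStep (fun l x => x :: l) board shape n cr cc sg m).2.1 ∧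
    (pvGStep (fun l x => x :: l) board shape n cr cc sg m).2.2 ≠ [] ∧
    (pvStepA board shape n cr cc sA m).2.2.1 = pvMinI ((pvGStep (fun l x => x :: l) board shape n cr cc sg m).2.2.map Prod.fst) ∧
    (pvStepA board shape n cr cc sA m).2.2.2.1 = pvMaxI ((pvGStep (fun l x => x :: l) board shape n cr cc sg m).2.2.map Prod.fst) ∧
    (pvStepA board shape n cr cc sA m).2.2.2.2.1 = pvMinI ((pvGStep (fun l x => x :: l) board shape n cr cc sg m).2.2.map Prod.snd) ∧
    (pvStepA board shape n cr cc sA m).2.2.2.2.2 = pvMaxI ((pvGStep (fun l x => x :: l) board shape n cr cc sg m).2.2.map Prod.snd) := by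
  by_cases hc : 0 ≤ cr + m.1 ∧ cr + m.1 < n ∧ 0 ≤ cc + m.2 ∧ cc + m.2 < n ∧
      pvCell board (cr + m.1) (cc + m.2) = shape ∧ pvVis sg.1 (cr + m.1) (cc + m.2) = false
  · obtain ⟨a1, a2, a3, a4, a5, a6⟩ := hc
    have hAg : ¬(cr + m.1 < 0 ∨ cr + m.1 ≥ n ∨ cc + m.2 < 0 ∨ cc + m.2 ≥ n ∨
        pvCell board (cr + m.1) (cc + m.2) ≠ shape ∨ pvVis sA.1 (cr + m.1) (cc + m.2) = true) := by
      rw [hv]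
      rintro (e | e | e | e | e | e)
      · omega
      · omega
      · omega
      · omega
      · exact e a5
      · rw [a6] at e; exact Bool.false_ne_true e
    have hsA : pvStepA board shape n cr cc sA m
        = (pvMark sA.1 (cr + m.1) (cc + m.2), (cr + m.1, cc + m.2) :: sA.2.1,
           min sA.2.2.1 (cr + m.1), max sA.2.2.2.1 (cr + m.1),
           min sA.2.2.2.2.1 (cc + m.2), max sA.2.2.2.2.2 (cc + m.2)) := by
      unfold pvStepA
      rw [if_neg hAg]
    have hsg : pvGStep (fun l x => x :: l) board shape n cr cc sg m
        = (pvMark sg.1 (cr + m.1) (cc + m.2), (cr + m.1, cc + m.2) :: sg.2.1,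
           sg.2.2 ++ [(cr + m.1, cc + m.2)]) := by
      unfold pvGStep
      rw [if_pos ⟨a1, a2, a3, a4, a5, a6⟩]
    rw [hsA, hsg]
    have hfne : sg.2.2.map Prod.fst ≠ [] := by simpa using hne
    have hsne : sg.2.2.map Prod.snd ≠ [] := by simpa using hne
    refine ⟨by rw [hv], by rw [hq], by simp, ?_, ?_, ?_, ?_⟩
    · simp only [List.map_append, List.map_cons, List.map_nil]
      rw [pvMinI_append _ _ hfne, h1]
    · simp only [List.map_append, List.map_cons, List.map_nil]
      rw [pvMaxI_append _ _ hfne, h2]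
    · simp only [List.map_append, List.map_cons, List.map_nil]
      rw [pvMinI_append _ _ hsne, h3]
    · simp only [List.map_append, List.map_cons, List.map_nil]
      rw [pvMaxI_append _ _ hsne, h4]
  · have hAg : cr + m.1 < 0 ∨ cr + m.1 ≥ n ∨ cc + m.2 < 0 ∨ cc + m.2 ≥ n ∨
        pvCell board (cr + m.1) (cc + m.2) ≠ shape ∨ pvVis sA.1 (cr + m.1) (cc + m.2) = true := by
      rw [hv]
      by_cases e1 : cr + m.1 < 0
      · exact Or.inl e1
      by_cases e2 : cr + m.1 ≥ n
      · exact Or.inr (Or.inl e2)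
      by_cases e3 : cc + m.2 < 0
      · exact Or.inr (Or.inr (Or.inl e3))
      by_cases e4 : cc + m.2 ≥ n
      · exact Or.inr (Or.inr (Or.inr (Or.inl e4)))
      by_cases e5 : pvCell board (cr + m.1) (cc + m.2) = shape
      · by_cases e6 : pvVis sg.1 (cr + m.1) (cc + m.2) = true
        · exact Or.inr (Or.inr (Or.inr (Or.inr (Or.inr e6))))
        · exact absurd ⟨by omega, by omega, by omega, by omega, e5,
            by simpa using e6⟩ hc
      · exact Or.inr (Or.inr (Or.inr (Or.inr (Or.inl e5))))
    have hsA : pvStepA board shape n cr cc sA m = sA := by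
      unfold pvStepA
      rw [if_pos hAg]
    have hsg : pvGStep (fun l x => x :: l) board shape n cr cc sg m = sg := by
      unfold pvGStep
      rw [if_neg hc]
    rw [hsA, hsg]
    exact ⟨hv, hq, hne, h1, h2, h3, h4⟩

theorem pvFoldA_R (board : List (List Int)) (shape n cr cc : Int) :
    ∀ (ms : List (Int × Int)) (sA : List (List Bool) × List (Int × Int) × Int × Int × Int × Int)
      (sg : List (List Bool) × List (Int × Int) × List (Int × Int)),
      sA.1 = sg.1 → sA.2.1 = sg.2.1 → sg.2.2 ≠ [] →
      sA.2.2.1 = pvMinI (sg.2.2.map Prod.fst) →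
      sA.2.2.2.1 = pvMaxI (sg.2.2.map Prod.fst) →
      sA.2.2.2.2.1 = pvMinI (sg.2.2.map Prod.snd) →
      sA.2.2.2.2.2 = pvMaxI (sg.2.2.map Prod.snd) →
      (ms.foldl (pvStepA board shape n cr cc) sA).1 = (ms.foldl (pvGStep (fun l x => x :: l) board shape n cr cc) sg).1 ∧
      (ms.foldl (pvStepA board shape n cr cc) sA).2.1 = (ms.foldl (pvGStep (fun l x => x :: l) board shape n cr cc) sg).2.1 ∧
      (ms.foldl (pvGStep (fun l x => x :: l) board shape n cr cc) sg).2.2 ≠ [] ∧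
      (ms.foldl (pvStepA board shape n cr cc) sA).2.2.1 = pvMinI ((ms.foldl (pvGStep (fun l x => x :: l) board shape n cr cc) sg).2.2.map Prod.fst) ∧
      (ms.foldl (pvStepA board shape n cr cc) sA).2.2.2.1 = pvMaxI ((ms.foldl (pvGStep (fun l x => x :: l) board shape n cr cc) sg).2.2.map Prod.fst) ∧
      (ms.foldl (pvStepA board shape n cr cc) sA).2.2.2.2.1 = pvMinI ((ms.foldl (pvGStep (fun l x => x :: l) board shape n cr cc) sg).2.2.map Prod.snd) ∧
      (ms.foldl (pvStepA board shape n cr cc) sA).2.2.2.2.2 = pvMaxI ((ms.foldl (pvGStep (fun l x => x :: l) board shape n cr cc) sg).2.2.map Prod.snd) := by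
  intro ms
  induction ms with
  | nil =>
    intro sA sg hv hq hne h1 h2 h3 h4
    exact ⟨hv, hq, hne, h1, h2, h3, h4⟩
  | cons m ms ih =>
    intro sA sg hv hq hne h1 h2 h3 h4
    obtain ⟨hv', hq', hne', h1', h2', h3', h4'⟩ :=
      pvStepA_R board shape n cr cc sA sg m hv hq hne h1 h2 h3 h4
    simp only [List.foldl_cons]
    exact ih _ _ hv' hq' hne' h1' h2' h3' h4'

theorem pvLoopA_gloop (board : List (List Int)) (shape n : Int) :
    ∀ (fuel : Nat) (sA : List (List Bool) × List (Int × Int) × Int × Int × Int × Int)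
      (sg : List (List Bool) × List (Int × Int) × List (Int × Int)),
      sA.1 = sg.1 → sA.2.1 = sg.2.1 → sg.2.2 ≠ [] →
      sA.2.2.1 = pvMinI (sg.2.2.map Prod.fst) →
      sA.2.2.2.1 = pvMaxI (sg.2.2.map Prod.fst) →
      sA.2.2.2.2.1 = pvMinI (sg.2.2.map Prod.snd) →
      sA.2.2.2.2.2 = pvMaxI (sg.2.2.map Prod.snd) →
      pvLoopA board shape n fuel sA
        = pvExtract (pvGLoop (fun l x => x :: l) board shape n fuel sg).2.2 := by
  intro fuel
  induction fuel with
  | zero =>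
    intro sA sg hv hq hne h1 h2 h3 h4
    unfold pvLoopA pvGLoop pvExtract
    rw [h1, h2, h3, h4]
  | succ fuel ih =>
    intro sA sg hv hq hne h1 h2 h3 h4
    obtain ⟨av, aq, ar⟩ := sA
    obtain ⟨gv, gp, gc⟩ := sg
    simp only at hv hq hne h1 h2 h3 h4
    subst hq
    cases aq with
    | nil =>
      show (ar.1, ar.2.2.1, ar.2.1, ar.2.2.2) = pvExtract gc
      unfold pvExtract
      rw [h1, h2, h3, h4]
    | cons p pend =>
      obtain ⟨pr, pc⟩ := p
      have hA : pvLoopA board shape n (fuel + 1) (av, (pr, pc) :: pend, ar)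
          = pvLoopA board shape n fuel (pvMoves.foldl (pvStepA board shape n pr pc) (av, pend, ar)) := rfl
      have hG : pvGLoop (fun l x => x :: l) board shape n (fuel + 1) (gv, (pr, pc) :: pend, gc)
          = pvGLoop (fun l x => x :: l) board shape n fuel
              (pvMoves.foldl (pvGStep (fun l x => x :: l) board shape n pr pc) (gv, pend, gc)) := rfl
      rw [hA, hG]
      obtain ⟨hv', hq', hne', h1', h2', h3', h4'⟩ :=
        pvFoldA_R board shape n pr pc pvMoves (av, pend, ar) (gv, pend, gc)
          hv rfl hne h1 h2 h3 h4
      exact ih _ _ hv' hq' hne' h1' h2' h3' h4'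
-- ---------- bridge: port B (append-only queue + index pointer) is the generic loop with a back push ----------

theorem pvStepB_fold (board : List (List Int)) (shape n cr cc : Int) :
    ∀ (ms : List (Int × Int)) (sB : List (List Bool) × List (Int × Int) × Int)
      (sg : List (List Bool) × List (Int × Int) × List (Int × Int)) (k : Nat),
      sB.1 = sg.1 → sB.2.1 = sg.2.2 → sB.2.2 = (k : Int) → k ≤ sB.2.1.length →
      sg.2.1 = sB.2.1.drop k →
      (ms.foldl (pvStepB board shape n cr cc) sB).1 = (ms.foldl (pvGStep (fun l x => l ++ [x]) board shape n cr cc) sg).1 ∧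
      (ms.foldl (pvStepB board shape n cr cc) sB).2.1 = (ms.foldl (pvGStep (fun l x => l ++ [x]) board shape n cr cc) sg).2.2 ∧
      (ms.foldl (pvStepB board shape n cr cc) sB).2.2 = (k : Int) ∧
      k ≤ (ms.foldl (pvStepB board shape n cr cc) sB).2.1.length ∧
      (ms.foldl (pvGStep (fun l x => l ++ [x]) board shape n cr cc) sg).2.1
        = (ms.foldl (pvStepB board shape n cr cc) sB).2.1.drop k := by
  intro ms
  induction ms with
  | nil =>
    intro sB sg k hv hq hh hk hp
    exact ⟨hv, hq, hh, hk, hp⟩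
  | cons m ms ih =>
    intro sB sg k hv hq hh hk hp
    simp only [List.foldl_cons]
    by_cases hc : 0 ≤ cr + m.1 ∧ cr + m.1 < n ∧ 0 ≤ cc + m.2 ∧ cc + m.2 < n ∧
        pvCell board (cr + m.1) (cc + m.2) = shape ∧ pvVis sg.1 (cr + m.1) (cc + m.2) = false
    · have hsB : pvStepB board shape n cr cc sB m
          = (pvMark sB.1 (cr + m.1) (cc + m.2), sB.2.1 ++ [(cr + m.1, cc + m.2)], sB.2.2) := by
        unfold pvStepB
        rw [if_pos (by rw [hv]; exact hc)]
      have hsg : pvGStep (fun l x => l ++ [x]) board shape n cr cc sg m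
          = (pvMark sg.1 (cr + m.1) (cc + m.2), sg.2.1 ++ [(cr + m.1, cc + m.2)], sg.2.2 ++ [(cr + m.1, cc + m.2)]) := by
        unfold pvGStep
        rw [if_pos hc]
      rw [hsB, hsg]
      refine ih _ _ k (by rw [hv]) (by rw [hq]) hh (by simp; omega) ?_
      simp only []
      rw [hp, List.drop_append_of_le_length hk]
    · have hsB : pvStepB board shape n cr cc sB m = sB := by
        unfold pvStepB
        rw [if_neg (by rw [hv]; exact hc)]
      have hsg : pvGStep (fun l x => l ++ [x]) board shape n cr cc sg m = sg := by
        unfold pvGStep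
        rw [if_neg hc]
      rw [hsB, hsg]
      exact ih _ _ k hv hq hh hk hp

theorem pvLoopB_gloop (board : List (List Int)) (shape n : Int) :
    ∀ (fuel : Nat) (sB : List (List Bool) × List (Int × Int) × Int)
      (sg : List (List Bool) × List (Int × Int) × List (Int × Int)) (k : Nat),
      sB.1 = sg.1 → sB.2.1 = sg.2.2 → sB.2.2 = (k : Int) → k ≤ sB.2.1.length →
      sg.2.1 = sB.2.1.drop k →
      pvLoopB board shape n fuel sB = (pvGLoop (fun l x => l ++ [x]) board shape n fuel sg).2.2 := by
  intro fuel
  induction fuel with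
  | zero =>
    intro sB sg k hv hq hh hk hp
    unfold pvLoopB pvGLoop
    exact hq
  | succ fuel ih =>
    intro sB sg k hv hq hh hk hp
    obtain ⟨gv, gp, gc⟩ := sg
    simp only at hv hq hp
    by_cases hlt : sB.2.2 < PySem.List.len sB.2.1
    · have hklt : k < sB.2.1.length := by
        rw [PySem.List.len_eq, hh] at hlt
        omega
      have hdrop : sB.2.1.drop k = sB.2.1[k] :: sB.2.1.drop (k + 1) :=
        List.drop_eq_getElem_cons hklt
      have hget : PySem.List.pyGetD sB.2.1 sB.2.2 (0, 0) = sB.2.1[k] := by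
        rw [hh]
        rw [pvGetD_idx _ _ _ k (pvIdx_nonneg _ _ (by omega) (by exact_mod_cast hklt))]
      have hstepB : pvLoopB board shape n (fuel + 1) sB
          = pvLoopB board shape n fuel
              (pvMoves.foldl (pvStepB board shape n sB.2.1[k].1 sB.2.1[k].2) (sB.1, sB.2.1, sB.2.2 + 1)) := by
        conv_lhs => unfold pvLoopB
        rw [if_pos hlt, hget]
      have hpcons : gp = sB.2.1[k] :: sB.2.1.drop (k + 1) := by rw [hp, hdrop]
      subst hpcons
      have hstepG : pvGLoop (fun l x => l ++ [x]) board shape n (fuel + 1)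
            (gv, sB.2.1[k] :: sB.2.1.drop (k + 1), gc)
          = pvGLoop (fun l x => l ++ [x]) board shape n fuel
              (pvMoves.foldl (pvGStep (fun l x => l ++ [x]) board shape n sB.2.1[k].1 sB.2.1[k].2)
                (gv, sB.2.1.drop (k + 1), gc)) := rfl
      rw [hstepB, hstepG]
      obtain ⟨hv', hq', hh', hk', hp'⟩ :=
        pvStepB_fold board shape n sB.2.1[k].1 sB.2.1[k].2 pvMoves
          (sB.1, sB.2.1, sB.2.2 + 1) (gv, sB.2.1.drop (k + 1), gc) (k + 1)
          (by simpa using hv) (by simpa using hq) (by simp [hh]) (by simpa using hklt) (by simp)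
      exact ih _ _ (k + 1) hv' hq' hh' hk' hp'
    · have hge : sB.2.1.length ≤ k := by
        rw [PySem.List.len_eq, hh] at hlt
        omega
      have hpnil : gp = [] := by
        rw [hp, List.drop_eq_nil_of_le hge]
      subst hpnil
      have hstepB : pvLoopB board shape n (fuel + 1) sB = sB.2.1 := by
        conv_lhs => unfold pvLoopB
        rw [if_neg hlt]
      rw [hstepB, hq]
      rfl

-- ---------- fuel arithmetic ----------

theorem pvFuel_eq (v : List (List Bool)) : pvFuel v = 2 + (v.map List.length).sum := by
  unfold pvFuel
  exact PySem.List.foldl_add_nat v List.length 2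

theorem pvSum_ge : ∀ (v : List (List Bool)) (a b : Nat), a ≤ v.length →
    (∀ (k : Nat) (hk : k < v.length), b ≤ v[k].length) → a * b ≤ (v.map List.length).sum := by
  intro v
  induction v with
  | nil =>
    intro a b ha _
    have : a = 0 := by simpa using ha
    subst this
    simp
  | cons row vt ih =>
    intro a b ha hb
    cases a with
    | zero => simp
    | succ a' =>
      have h0 : b ≤ row.length := hb 0 (by simp)
      have ht : a' * b ≤ (vt.map List.length).sum := by
        refine ih a' b (by simpa using ha) ?_
        intro k hk
        have := hb (k + 1) (by simpa using hk)
        simpa using this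
      have hsum : ((row :: vt).map List.length).sum = row.length + (vt.map List.length).sum := by
        simp
      rw [hsum]
      calc (a' + 1) * b = a' * b + b := by ring
        _ ≤ (vt.map List.length).sum + row.length := by omega
        _ = row.length + (vt.map List.length).sum := by omega
-- ---------- degenerate runs: no neighbour of the start is ever taken ----------

theorem pvMinI_singleton (a : Int) : pvMinI [a] = a := by
  simp [pvMinI, PySem.List.min?]

theorem pvMaxI_singleton (a : Int) : pvMaxI [a] = a := by
  simp [pvMaxI, PySem.List.max?]

theorem pvFoldA_id (board : List (List Int)) (shape n cr cc : Int) (v : List (List Bool)) :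
    ∀ (ms : List (Int × Int)) (s : List (List Bool) × List (Int × Int) × Int × Int × Int × Int),
      s.1 = v →
      (∀ m ∈ ms, cr + m.1 < 0 ∨ cr + m.1 ≥ n ∨ cc + m.2 < 0 ∨ cc + m.2 ≥ n ∨
        pvCell board (cr + m.1) (cc + m.2) ≠ shape ∨ pvVis v (cr + m.1) (cc + m.2) = true) →
      ms.foldl (pvStepA board shape n cr cc) s = s := by
  intro ms
  induction ms with
  | nil => intro s _ _; rfl
  | cons m ms ih =>
    intro s hs hg
    have hstep : pvStepA board shape n cr cc s m = s := by
      unfold pvStepA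
      rw [if_pos (by rw [hs]; exact hg m List.mem_cons_self)]
    rw [List.foldl_cons, hstep]
    exact ih s hs (fun m' hm' => hg m' (List.mem_cons_of_mem _ hm'))

theorem pvFoldB_id (board : List (List Int)) (shape n cr cc : Int) (v : List (List Bool)) :
    ∀ (ms : List (Int × Int)) (s : List (List Bool) × List (Int × Int) × Int),
      s.1 = v →
      (∀ m ∈ ms, cr + m.1 < 0 ∨ cr + m.1 ≥ n ∨ cc + m.2 < 0 ∨ cc + m.2 ≥ n ∨
        pvCell board (cr + m.1) (cc + m.2) ≠ shape ∨ pvVis v (cr + m.1) (cc + m.2) = true) →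
      ms.foldl (pvStepB board shape n cr cc) s = s := by
  intro ms
  induction ms with
  | nil => intro s _ _; rfl
  | cons m ms ih =>
    intro s hs hg
    have hstep : pvStepB board shape n cr cc s m = s := by
      unfold pvStepB
      rw [if_neg ?_]
      intro hcond
      obtain ⟨a1, a2, a3, a4, a5, a6⟩ := hcond
      rcases hg m List.mem_cons_self with e | e | e | e | e | e
      · omega
      · omega
      · omega
      · omega
      · exact e a5
      · rw [hs] at a6; rw [e] at a6; exact Bool.true_eq_false.mp a6
    rw [List.foldl_cons, hstep]
    exact ih s hs (fun m' hm' => hg m' (List.mem_cons_of_mem _ hm'))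

theorem pv_easy (r c : Int) (visited : List (List Bool)) (board : List (List Int)) (n : Int)
    (hg : ∀ m ∈ pvMoves,
      r + m.1 < 0 ∨ r + m.1 ≥ n ∨ c + m.2 < 0 ∨ c + m.2 ≥ n ∨
      pvCell board (r + m.1) (c + m.2) ≠ pvCell board r c ∨
      pvVis (pvMark visited r c) (r + m.1) (c + m.2) = true) :
    dfs r c visited board n = dfs_alt r c visited board n := by
  obtain ⟨f, hf⟩ : ∃ f, pvFuel visited = f + 2 :=
    ⟨(visited.map List.length).sum, by rw [pvFuel_eq]; omega⟩
  have hAr : dfs r c visited board n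
      = pvLoopA board (pvCell board r c) n (pvFuel visited)
          (pvMark visited r c, [(r, c)], r, r, c, c) := rfl
  have hBr : dfs_alt r c visited board n
      = pvExtract (pvLoopB board (pvCell board r c) n (pvFuel visited)
          (pvMark visited r c, [(r, c)], 0)) := rfl
  rw [hAr, hBr, hf]
  have hA1 : pvLoopA board (pvCell board r c) n (f + 2) (pvMark visited r c, [(r, c)], r, r, c, c)
      = pvLoopA board (pvCell board r c) n (f + 1)
          (pvMoves.foldl (pvStepA board (pvCell board r c) n r c)
            (pvMark visited r c, [], r, r, c, c)) := rfl
  rw [hA1, pvFoldA_id board (pvCell board r c) n r c (pvMark visited r c) pvMoves _ rfl hg]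
  have hA2 : pvLoopA board (pvCell board r c) n (f + 1) (pvMark visited r c, [], r, r, c, c)
      = (r, c, r, c) := rfl
  rw [hA2]
  have hB1 : pvLoopB board (pvCell board r c) n (f + 2) (pvMark visited r c, [(r, c)], 0)
      = pvLoopB board (pvCell board r c) n (f + 1)
          (pvMoves.foldl (pvStepB board (pvCell board r c) n r c)
            (pvMark visited r c, [(r, c)], 0 + 1)) := by
    conv_lhs => unfold pvLoopB
    rw [if_pos (by rw [PySem.List.len_eq]; norm_num), PySem.List.pyGetD_zero_cons]
  rw [hB1, pvFoldB_id board (pvCell board r c) n r c (pvMark visited r c) pvMoves _ rfl hg]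
  have hB2 : pvLoopB board (pvCell board r c) n (f + 1) (pvMark visited r c, [(r, c)], 0 + 1)
      = [(r, c)] := by
    conv_lhs => unfold pvLoopB
    rw [if_neg (by rw [PySem.List.len_eq]; norm_num)]
  rw [hB2]
  unfold pvExtract
  simp only [List.map_cons, List.map_nil, pvMinI_singleton, pvMaxI_singleton]

-- ---------- the full n×n grid case: order independence via the reachable set ----------

theorem pv_main (r c : Int) (visited : List (List Bool)) (board : List (List Int)) (n : Int)
    (hn : 1 ≤ n) (hvl : n ≤ (visited.length : Int))
    (hvr : ∀ row ∈ visited, n ≤ (row.length : Int))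
    (h3 : PySem.Raise.InRange visited.length r)
    (h4 : PySem.Raise.InRange (PySem.List.pyGetD visited r []).length c) :
    dfs r c visited board n = dfs_alt r c visited board n := by
  have hgv : pvGrid visited n := ⟨hvl, fun k hk => hvr _ (List.getElem_mem hk)⟩
  have hg0 : pvGrid (pvMark visited r c) n := pvGrid_pvMark_any _ _ _ _ hgv
  have Hstart : pvVis (pvMark visited r c) r c = true := pvVis_pvMark_self_any _ _ _ h3 h4
  have hinv0 : pvInv board n (pvCell board r c) (pvMark visited r c) (r, c)
      (pvMark visited r c, [(r, c)], [(r, c)]) := by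
    refine ⟨by simp, ?_, by simp, ?_, fun q hq => hq, ?_, ?_, hg0⟩
    · intro q hq; simp at hq
    · intro q hq
      simp only [List.mem_singleton] at hq
      rw [hq]
      exact pvReach.base
    · intro i j _ _ _ _; simp
    · intro x hx hxp _ _ _
      exact absurd hx hxp
  have hNle : n.toNat * n.toNat + 1 ≤ pvFuel visited := by
    rw [pvFuel_eq]
    have := pvSum_ge visited n.toNat n.toNat (by omega)
      (fun k hk => by have := hgv.2 k hk; omega)
    omega
  have hfb : n.toNat * n.toNat + 1
      + ((pvMark visited r c, [(r, c)], [(r, c)]) : List (List Bool) × List (Int × Int) × List (Int × Int)).2.1.length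
      - ((pvMark visited r c, [(r, c)], [(r, c)]) : List (List Bool) × List (Int × Int) × List (Int × Int)).2.2.length
      ≤ pvFuel visited := by
    simp only [List.length_cons, List.length_nil]
    omega
  have hmemA := pvGLoop_mem (fun l x => x :: l) (fun l x y => List.mem_cons)
    (fun l x => rfl) board n (pvCell board r c) (pvMark visited r c) (r, c) Hstart
    (pvFuel visited) (pvMark visited r c, [(r, c)], [(r, c)]) hinv0 hfb
  have hmemB := pvGLoop_mem (fun l x => l ++ [x]) (fun l x y => by simp [or_comm])
    (fun l x => by simp) board n (pvCell board r c) (pvMark visited r c) (r, c) Hstart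
    (pvFuel visited) (pvMark visited r c, [(r, c)], [(r, c)]) hinv0 hfb
  have hA : dfs r c visited board n
      = pvExtract (pvGLoop (fun l x => x :: l) board (pvCell board r c) n (pvFuel visited)
          (pvMark visited r c, [(r, c)], [(r, c)])).2.2 := by
    have hAr : dfs r c visited board n
        = pvLoopA board (pvCell board r c) n (pvFuel visited)
            (pvMark visited r c, [(r, c)], r, r, c, c) := rfl
    rw [hAr]
    exact pvLoopA_gloop board (pvCell board r c) n (pvFuel visited)
      (pvMark visited r c, [(r, c)], r, r, c, c)
      (pvMark visited r c, [(r, c)], [(r, c)])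
      rfl rfl (by simp)
      (by simp [pvMinI_singleton]) (by simp [pvMaxI_singleton])
      (by simp [pvMinI_singleton]) (by simp [pvMaxI_singleton])
  have hB : dfs_alt r c visited board n
      = pvExtract (pvGLoop (fun l x => l ++ [x]) board (pvCell board r c) n (pvFuel visited)
          (pvMark visited r c, [(r, c)], [(r, c)])).2.2 := by
    have hBr : dfs_alt r c visited board n
        = pvExtract (pvLoopB board (pvCell board r c) n (pvFuel visited)
            (pvMark visited r c, [(r, c)], 0)) := rfl
    rw [hBr]
    rw [pvLoopB_gloop board (pvCell board r c) n (pvFuel visited)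
      (pvMark visited r c, [(r, c)], 0)
      (pvMark visited r c, [(r, c)], [(r, c)]) 0
      rfl rfl rfl (by simp) (by simp)]
  have hne : (pvGLoop (fun l x => x :: l) board (pvCell board r c) n (pvFuel visited)
      (pvMark visited r c, [(r, c)], [(r, c)])).2.2 ≠ [] :=
    List.ne_nil_of_mem ((hmemA (r, c)).mpr pvReach.base)
  rw [hA, hB]
  exact pvExtract_congr _ _ (fun q => (hmemA q).trans (hmemB q).symm) hne
-- ===== VERDICT (by name: the statement is the Claim_ definition above) =====
theorem dfs_spec : Claim_equal_dfs := by
  intro r c visited board n _ hpre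
  unfold Spec_dfs
  obtain ⟨hb1, hb2, hv1, hv2, hcase⟩ := hpre
  rcases hcase with hn | hfull | hiso
  · -- n ≤ 0 : every neighbour fails the bounds test
    apply pv_easy
    intro m _
    by_cases h : r + m.1 < 0
    · exact Or.inl h
    · exact Or.inr (Or.inl (by omega))
  · -- full n×n grid: the order-independence argument
    obtain ⟨hn1, _, _, _, _, _, hvl, _, hvr⟩ := hfull
    exact pv_main r c visited board n hn1 hvl hvr hv1 hv2
  · -- isolated start: every neighbour fails its test already against the freshly marked grid
    apply pv_easy
    intro m hm
    have hok := (List.all_eq_true.mp hiso) m hm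
    unfold pvNbrOk at hok
    simp only [Bool.or_eq_true, Bool.and_eq_true, Bool.not_eq_true', Bool.and_eq_false_iff,
      decide_eq_true_eq, decide_eq_false_iff_not, bne_iff_ne] at hok
    rcases hok with hnb | ⟨⟨_, _⟩, hsv⟩
    · by_cases h1 : r + m.1 < 0
      · exact Or.inl h1
      by_cases h2 : n ≤ r + m.1
      · exact Or.inr (Or.inl h2)
      by_cases h3 : c + m.2 < 0
      · exact Or.inr (Or.inr (Or.inl h3))
      by_cases h4 : n ≤ c + m.2
      · exact Or.inr (Or.inr (Or.inr (Or.inl h4)))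
      · exfalso
        omega
    · rcases hsv with hne | ⟨⟨_, _⟩, hv⟩
      · exact Or.inr (Or.inr (Or.inr (Or.inr (Or.inl hne))))
      · exact Or.inr (Or.inr (Or.inr (Or.inr (Or.inr
          (pvVis_mark_mono visited r c _ _ hv)))))
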